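-- pv_equiv track=rewrite | github.com/ivanvikvik/Stage10FeedbackProject | task07o.py | is_one_odd
-- ===== SOURCE A (Python) =====
-- def is_one_odd(num):
--     num = abs(num)
--
--     while num > 0:
--         digit = num % 10
--         num //= 10
--
--         if digit % 2 == 1:
--             return True
--
--     return False
-- ===== SOURCE B (Python) =====
-- def is_one_odd(num):
--     return any(ch in "13579" for ch in str(abs(num)))
-- ===== Notes on version B (the rewrite author's own statement) =====
-- stated objective: idiomatic
-- what changed: Replaces the arithmetic modulus/floor-division digit-extraction while-loop with a one-line any() over the characters of the decimal string of the absolute value, checking membership in the odd-digit string.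
import Mathlib
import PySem

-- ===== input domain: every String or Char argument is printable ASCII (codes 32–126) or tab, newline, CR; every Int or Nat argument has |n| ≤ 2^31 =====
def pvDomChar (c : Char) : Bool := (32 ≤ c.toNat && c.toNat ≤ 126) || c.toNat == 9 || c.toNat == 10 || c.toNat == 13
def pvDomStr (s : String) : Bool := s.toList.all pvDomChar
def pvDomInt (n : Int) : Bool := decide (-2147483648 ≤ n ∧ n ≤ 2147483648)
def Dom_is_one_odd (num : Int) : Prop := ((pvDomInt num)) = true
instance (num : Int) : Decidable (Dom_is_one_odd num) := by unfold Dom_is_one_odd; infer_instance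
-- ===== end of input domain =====

-- B replaces the arithmetic %10 // 10 digit-extraction loop with an any() over the characters of str(abs(num)) (idiomatic; same cost).


-- ===== PORT A =====
-- the while-loop of A: num is already nonnegative (num = abs(num) ran before the loop)
def is_one_odd_loop (num : Int) : Bool :=
  if h : num > 0 then
    let digit := PySem.Int.mod num 10
    let num' := PySem.Int.floordiv num 10
    if PySem.Int.mod digit 2 = 1 then true
    else is_one_odd_loop num'
  else false
termination_by num.toNat
decreasing_by
  have h10 : (0:Int) < 10 := by norm_num
  have : PySem.Int.floordiv num 10 = num / 10 := PySem.Int.floordiv_eq_ediv_of_pos h10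
  simp only [this]
  omega

def is_one_odd (num : Int) : Bool := is_one_odd_loop |num|

-- ===== PORT B =====
def is_one_odd_alt (num : Int) : Bool :=
  (PySem.Int.toStr |num|).toList.any (fun ch => ("13579".toList).contains ch)

-- ===== PRECONDITION & SPEC =====
def Spec_is_one_odd (num : Int) (out : Bool) : Prop := out = is_one_odd_alt num
instance (num : Int) (out : Bool) : Decidable (Spec_is_one_odd num out) := by unfold Spec_is_one_odd; infer_instance

-- ===== CLAIM (what is proved, stated in full; the proofs are below) =====
def Claim_equal_is_one_odd : Prop := ∀ (num : Int), Dom_is_one_odd num → Spec_is_one_odd num (is_one_odd num)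

-- ===== LEMMAS AND PROOFS =====

-- reference predicate on Nat: some decimal digit of n is odd
def pvDigitsOdd (n : Nat) : Bool :=
  if n = 0 then false
  else (decide (n % 10 % 2 = 1)) || pvDigitsOdd (n / 10)
termination_by n
decreasing_by exact Nat.div_lt_self (Nat.pos_of_ne_zero (by assumption)) (by norm_num)

-- the membership test of B, on a single digit character
def pvP (c : Char) : Bool := ("13579".toList).contains c

lemma pvP_digitChar (d : Nat) (hd : d < 10) : pvP (Nat.digitChar d) = decide (d % 2 = 1) := by
  interval_cases d <;> decide

-- A's loop equals the Nat predicate on nonnegative inputs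
lemma loop_eq_digitsOdd (num : Int) (h0 : 0 ≤ num) : is_one_odd_loop num = pvDigitsOdd num.toNat := by
  by_cases h : num > 0
  · have h10 : (0:Int) < 10 := by norm_num
    have hm : PySem.Int.mod num 10 = num % 10 := PySem.Int.mod_eq_emod_of_pos h10
    have hd : PySem.Int.floordiv num 10 = num / 10 := PySem.Int.floordiv_eq_ediv_of_pos h10
    have h2 : (0:Int) < 2 := by norm_num
    have hm2 : PySem.Int.mod (num % 10) 2 = (num % 10) % 2 := PySem.Int.mod_eq_emod_of_pos h2
    rw [is_one_odd_loop, dif_pos h]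
    simp only [hm, hd, hm2]
    have hge : 0 ≤ num / 10 := Int.ediv_nonneg h0 (by norm_num)
    have ih := loop_eq_digitsOdd (num / 10) hge
    rw [ih]
    have hne : num.toNat ≠ 0 := by omega
    conv_rhs => rw [pvDigitsOdd]
    rw [if_neg hne]
    have e1 : num % 10 = ((num.toNat % 10 : Nat) : Int) := by omega
    have e2 : (num / 10).toNat = num.toNat / 10 := by omega
    rw [e2, e1]
    by_cases hb : num.toNat % 10 % 2 = 1
    · rw [if_pos (show ((num.toNat % 10 : Nat) : Int) % 2 = 1 by omega)]
      simp only [hb, decide_true, Bool.true_or]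
    · rw [if_neg (show ¬ ((num.toNat % 10 : Nat) : Int) % 2 = 1 by omega),
          decide_eq_false hb, Bool.false_or]
  · rw [is_one_odd_loop, dif_neg h]
    have : num.toNat = 0 := by omega
    rw [this, pvDigitsOdd]
    simp
termination_by num.toNat
decreasing_by omega

-- toDigitsCore accumulates: the accumulator is appended on the right
lemma toDigitsCore_append (f : Nat) : ∀ (n : Nat) (ds : List Char),
    Nat.toDigitsCore 10 f n ds = Nat.toDigitsCore 10 f n [] ++ ds := by
  induction f with
  | zero => intro n ds; simp [Nat.toDigitsCore]
  | succ f ih =>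
    intro n ds
    simp only [Nat.toDigitsCore]
    by_cases h : n / 10 = 0
    · simp [h]
    · rw [if_neg h, if_neg h, ih (n / 10) (Nat.digitChar (n % 10) :: ds),
          ih (n / 10) [Nat.digitChar (n % 10)]]
      simp

-- any over the digit characters produced by toDigitsCore, with enough fuel
lemma any_toDigitsCore (n : Nat) : ∀ (f : Nat), n < f →
    (Nat.toDigitsCore 10 f n []).any pvP = (pvP (Nat.digitChar (n % 10)) || pvDigitsOdd (n / 10)) := by
  induction n using Nat.strong_induction_on with
  | _ n ih =>
    intro f hf
    match f with
    | f + 1 =>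
      simp only [Nat.toDigitsCore]
      by_cases h : n / 10 = 0
      · rw [if_pos h, h, pvDigitsOdd]
        simp
      · rw [if_neg h, toDigitsCore_append f (n / 10) [Nat.digitChar (n % 10)]]
        have hlt : n / 10 < n := Nat.div_lt_self (by omega) (by norm_num)
        rw [List.any_append,
            ih (n / 10) hlt f (by omega)]
        conv_rhs => rw [pvDigitsOdd, if_neg h]
        rw [pvP_digitChar ((n / 10) % 10) (Nat.mod_lt _ (by norm_num))]
        simp only [List.any_cons, List.any_nil, Bool.or_false]
        ac_rfl

-- B equals the Nat predicate
lemma alt_eq_digitsOdd (m : Nat) :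
    (Nat.toDigits 10 m).any pvP = pvDigitsOdd m := by
  rw [Nat.toDigits, any_toDigitsCore m (m + 1) (by omega)]
  by_cases h : m = 0
  · subst h; simp [pvDigitsOdd]; decide
  · conv_rhs => rw [pvDigitsOdd, if_neg h]
    rw [pvP_digitChar (m % 10) (Nat.mod_lt _ (by norm_num))]

-- ===== VERDICT (by name: the statement is the Claim_ definition above) =====
theorem is_one_odd_spec : Claim_equal_is_one_odd := by
  intro num _
  show is_one_odd num = is_one_odd_alt num
  unfold is_one_odd is_one_odd_alt
  rw [PySem.Int.toList_toStr]
  have habs : (0:Int) ≤ |num| := abs_nonneg num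
  rw [loop_eq_digitsOdd |num| habs]
  have : PySem.Int.toChars |num| = Nat.toDigits 10 (|num|).toNat := by
    rw [PySem.Int.toChars, if_neg (by omega)]
  rw [this]
  exact (alt_eq_digitsOdd (|num|).toNat).symm
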